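-- pv_equiv track=rewrite | github.com/TrellixVulnTeam/attention_deep_learning_semeval_5ALE | src/read/corpus_opinions.py | fd2
-- ===== SOURCE A (Python) =====
-- def fd2(counts):
--     '''Given a list of 2-uplets (e.g., [(a,pos), (a,pos), (a,neg), ...]), form a dict of frequencies of specific items (e.g., {a:{pos:2, neg:1}, ...}).'''
--     d = {}
--     for i in counts:
--         # If the first element of the 2-uplet is not in the map, add it.
--         if i[0] in d:
--             if i[1] in d[i[0]]:
--                 d[i[0]][i[1]] += 1
--             else:
--                 d[i[0]][i[1]] = 1
--         else:
--             d[i[0]] = {i[1]: 1}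
--     return d
-- ===== SOURCE B (Python) =====
-- def _tally(vals):
--     c = {}
--     for v in vals:
--         c[v] = c.get(v, 0) + 1
--     return c
--
-- def fd2(counts):
--     '''Two-pass: first group the second elements by the first, then count each bucket.'''
--     groups = {}
--     for k, v in counts:
--         groups.setdefault(k, []).append(v)
--     return {k: _tally(vals) for k, vals in groups.items()}
-- ===== Notes on version B (the rewrite author's own statement) =====
-- stated objective: alternative
-- what changed: Replaces A's single interleaved pass with manual nested presence branches by a two-pass decomposition: first group the second components into per-key buckets, then tally each bucket into a count dict.
import Mathlib
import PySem

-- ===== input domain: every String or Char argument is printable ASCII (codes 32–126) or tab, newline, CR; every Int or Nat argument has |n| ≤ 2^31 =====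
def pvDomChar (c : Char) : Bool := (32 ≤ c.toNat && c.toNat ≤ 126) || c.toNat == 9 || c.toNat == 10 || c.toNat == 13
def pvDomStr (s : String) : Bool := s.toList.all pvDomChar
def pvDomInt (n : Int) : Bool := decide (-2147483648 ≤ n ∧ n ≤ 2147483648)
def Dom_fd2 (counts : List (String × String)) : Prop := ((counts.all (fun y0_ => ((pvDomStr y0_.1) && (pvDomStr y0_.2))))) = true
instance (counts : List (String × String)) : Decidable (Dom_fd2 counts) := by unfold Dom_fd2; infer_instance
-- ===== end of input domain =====

-- B replaces A's single interleaved pass (with manual presence branches on the nested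
-- dict) by a two-pass decomposition: group the second components into per-key buckets,
-- then tally each bucket; same cost, different structure (objective: alternative).

-- ===== PORT A =====
def fd2 (counts : List (String × String)) : List (String × List (String × Int)) :=
  let d : PySem.Dict String (PySem.Dict String Int) :=
    counts.foldl (fun d i =>
      if d.contains i.1 then
        -- d[i[0]]: guarded by the contains test above, so getD with a dummy default is exact
        let inner := d.getD i.1 PySem.Dict.empty
        if inner.contains i.2 then
          -- d[i[0]][i[1]] += 1 mutates the inner dict in place; re-inserting at the same
          -- key (overwrite keeps position) models that exactly
          d.insert i.1 (inner.insert i.2 (inner.getD i.2 0 + 1))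
        else
          d.insert i.1 (inner.insert i.2 1)
      else
        d.insert i.1 (PySem.Dict.ofList [(i.2, 1)])) PySem.Dict.empty
  d.items.map (fun p => (p.1, p.2.items))

-- ===== PORT B =====
-- _tally: c[v] = c.get(v, 0) + 1 over the bucket
def fd2AltTally (vals : List String) : PySem.Dict String Int :=
  vals.foldl (fun c v => c.insert v (c.getD v 0 + 1)) PySem.Dict.empty

def fd2_alt (counts : List (String × String)) : List (String × List (String × Int)) :=
  -- pass 1: groups.setdefault(k, []).append(v)  ≡  modify k [] (· ++ [v])
  let groups : PySem.Dict String (List String) :=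
    counts.foldl (fun g i => g.modify i.1 [] (· ++ [i.2])) PySem.Dict.empty
  -- pass 2: {k: _tally(vals) for k, vals in groups.items()}
  groups.items.map (fun p => (p.1, (fd2AltTally p.2).items))

-- ===== PRECONDITION & SPEC =====
def Spec_fd2 (counts : List (String × String)) (out : List (String × List (String × Int))) : Prop := out = fd2_alt counts
instance (counts : List (String × String)) (out : List (String × List (String × Int))) : Decidable (Spec_fd2 counts out) := by unfold Spec_fd2; infer_instance

-- ===== CLAIM (what is proved, stated in full; the proofs are below) =====
def Claim_equal_fd2 : Prop := ∀ (counts : List (String × String)), Dom_fd2 counts → Spec_fd2 counts (fd2 counts)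

-- ===== LEMMAS AND PROOFS =====

-- pvF maps B's grouping state to A's nested-dict state: each bucket becomes its counter.
def pvF (g : PySem.Dict String (List String)) : PySem.Dict String (PySem.Dict String Int) :=
  PySem.Dict.mk (g.items.map (fun p => (p.1, PySem.Dict.counter p.2)))

theorem pvF_contains (g : PySem.Dict String (List String)) (k : String) :
    (pvF g).contains k = g.contains k := by
  simp [pvF, PySem.Dict.contains, List.any_map, Function.comp_def]

theorem pvF_get? (g : PySem.Dict String (List String)) (k : String) :
    (pvF g).get? k = (g.get? k).map PySem.Dict.counter := by
  simp [pvF, PySem.Dict.get?, List.find?_map, Function.comp_def, Option.map_map]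

theorem pvF_insert (g : PySem.Dict String (List String)) (k : String) (v : List String) :
    pvF (g.insert k v) = (pvF g).insert k (PySem.Dict.counter v) := by
  by_cases h : g.contains k = true
  · simp only [PySem.Dict.insert, pvF_contains, h, if_true]
    simp only [pvF, List.map_map, PySem.Dict.mk.injEq]
    apply List.map_congr_left
    intro p _
    by_cases hp : p.1 = k <;> simp [hp]
  · rw [Bool.not_eq_true] at h
    simp only [PySem.Dict.insert, pvF_contains, h, Bool.false_eq_true, if_false]
    simp [pvF]

theorem pvCounter_single (x : String) :
    PySem.Dict.ofList [(x, (1:Int))] = PySem.Dict.counter [x] := by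
  simp [PySem.Dict.counter, PySem.Dict.ofList, PySem.Dict.update, PySem.Dict.modify,
    PySem.Dict.insert, PySem.Dict.empty, PySem.Dict.getD, PySem.Dict.get?, PySem.Dict.contains]

-- one step of A's loop, started from pvF g, is pvF of one step of B's grouping loop
theorem pvStep (g : PySem.Dict String (List String)) (i : String × String) :
    (if (pvF g).contains i.1 then
        let inner := (pvF g).getD i.1 PySem.Dict.empty
        if inner.contains i.2 then
          (pvF g).insert i.1 (inner.insert i.2 (inner.getD i.2 0 + 1))
        else
          (pvF g).insert i.1 (inner.insert i.2 1)
      else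
        (pvF g).insert i.1 (PySem.Dict.ofList [(i.2, 1)]))
    = pvF (g.modify i.1 [] (· ++ [i.2])) := by
  by_cases h : g.contains i.1 = true
  · have h2 : (pvF g).contains i.1 = true := by rw [pvF_contains]; exact h
    obtain ⟨v, hv⟩ : ∃ v, g.get? i.1 = some v := by
      have := (PySem.Dict.contains_eq_isSome_get? (d := g) (k := i.1))
      rw [h] at this
      exact Option.isSome_iff_exists.mp this.symm
    have hinner : (pvF g).getD i.1 PySem.Dict.empty = PySem.Dict.counter v := by
      simp [PySem.Dict.getD, pvF_get?, hv]
    have hmod : g.modify i.1 [] (· ++ [i.2]) = g.insert i.1 (v ++ [i.2]) := by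
      simp [PySem.Dict.modify, PySem.Dict.getD, hv]
    rw [hmod, pvF_insert, PySem.Dict.counter_append_singleton]
    simp only [h2, if_true, hinner, PySem.Dict.modify]
    by_cases hc : (PySem.Dict.counter v).contains i.2 = true
    · simp [hc]
    · rw [Bool.not_eq_true] at hc
      have hnm : i.2 ∉ v := by
        rw [PySem.Dict.contains_counter] at hc
        simpa using hc
      simp [hc, PySem.Dict.getD_counter, List.count_eq_zero_of_not_mem hnm]
  · rw [Bool.not_eq_true] at h
    have h2 : (pvF g).contains i.1 = false := by rw [pvF_contains]; exact h
    have hmod : g.modify i.1 [] (· ++ [i.2]) = g.insert i.1 [i.2] := by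
      simp [PySem.Dict.modify, PySem.Dict.getD_of_not_contains g _ h]
    rw [hmod, pvF_insert, ← pvCounter_single]
    simp [h2]

theorem pvFold (l : List (String × String)) (g : PySem.Dict String (List String)) :
    l.foldl (fun d i =>
      if d.contains i.1 then
        let inner := d.getD i.1 PySem.Dict.empty
        if inner.contains i.2 then
          d.insert i.1 (inner.insert i.2 (inner.getD i.2 0 + 1))
        else
          d.insert i.1 (inner.insert i.2 1)
      else
        d.insert i.1 (PySem.Dict.ofList [(i.2, 1)])) (pvF g)
    = pvF (l.foldl (fun g i => g.modify i.1 [] (· ++ [i.2])) g) := by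
  induction l generalizing g with
  | nil => rfl
  | cons x t ih => simp only [List.foldl_cons, pvStep, ih]

-- ===== VERDICT (by name: the statement is the Claim_ definition above) =====
theorem fd2_spec : Claim_equal_fd2 := by
  intro counts _
  unfold Spec_fd2
  have h0 : (PySem.Dict.empty : PySem.Dict String (PySem.Dict String Int)) = pvF PySem.Dict.empty := rfl
  simp only [fd2, fd2_alt, h0, pvFold]
  simp [pvF, List.map_map, Function.comp_def, fd2AltTally, PySem.Dict.counter_eq_foldl,
    PySem.Dict.foldl_insert_getD_add_one_eq_counter]
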